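-- pv_equiv track=rewrite | github.com/Guru-RF/LoRa433APRSTracker | code.py | base91_encode
-- ===== SOURCE A (Python) =====
-- def base91_encode(n):
--     """
--     Encode a non-negative integer to APRS Base91 with at least 2 chars.
--     """
--     n = int(n)
--     if n < 0:
--         raise ValueError("base91_encode expects non-negative integer")
--
--     out = []
--     while True:
--         out.append(chr(33 + (n % 91)))
--         n //= 91
--         if n == 0:
--             break
--
--     if len(out) == 1:
--         out.append("!")  # pad to 2 chars
--
--     return "".join(reversed(out))
-- ===== SOURCE B (Python) =====
-- def base91_encode(n):
--     """
--     Encode a non-negative integer to APRS Base91 with at least 2 chars.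
--     """
--     n = int(n)
--     if n < 0:
--         raise ValueError("base91_encode expects non-negative integer")
--
--     def enc(m):
--         if m < 91:
--             return chr(33 + m)
--         return enc(m // 91) + chr(33 + m % 91)
--
--     s = enc(n)
--     return "!" + s if len(s) == 1 else s
-- ===== Notes on version B (the rewrite author's own statement) =====
-- stated objective: alternative
-- what changed: B builds the string most-significant-digit-first by a recursive helper (prepending '!' to pad), instead of A's LSB-first accumulation loop followed by reversal and append-pad.
import Mathlib
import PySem

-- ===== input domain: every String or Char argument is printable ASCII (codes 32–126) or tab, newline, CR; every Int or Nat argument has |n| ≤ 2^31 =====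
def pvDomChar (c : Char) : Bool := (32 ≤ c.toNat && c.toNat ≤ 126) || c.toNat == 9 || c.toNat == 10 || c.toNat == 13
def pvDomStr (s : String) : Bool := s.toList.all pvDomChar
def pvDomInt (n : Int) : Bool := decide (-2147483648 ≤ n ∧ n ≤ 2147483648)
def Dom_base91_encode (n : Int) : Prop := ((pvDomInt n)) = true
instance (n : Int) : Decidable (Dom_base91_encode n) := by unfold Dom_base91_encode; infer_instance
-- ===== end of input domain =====

-- B builds the result most-significant-digit-first recursively (padding by PREPENDING '!'),
-- where A accumulates least-significant-first, appends the pad, and reverses. Same value everywhere A returns.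

-- ===== PORT A =====
-- A's while-True loop: append chr(33 + n % 91) to `out`, n //= 91, stop when n == 0.
def base91A_loop (m : Nat) (out : List Char) : List Char :=
  if h : m / 91 = 0 then out ++ [Char.ofNat (33 + m % 91)]
  else base91A_loop (m / 91) (out ++ [Char.ofNat (33 + m % 91)])
  termination_by m
  decreasing_by omega

def base91_encode (n : Int) : String :=
  if n < 0 then ""  -- Python raises ValueError here; excluded by Pre_
  else
    let out := base91A_loop n.toNat []
    let out := if out.length = 1 then out ++ ['!'] else out
    String.mk out.reverse

-- ===== PORT B =====
-- B's recursive helper enc: MSB-first digits.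
def base91B_enc (m : Nat) : List Char :=
  if h : m < 91 then [Char.ofNat (33 + m)]
  else base91B_enc (m / 91) ++ [Char.ofNat (33 + m % 91)]
  termination_by m
  decreasing_by omega

def base91_encode_alt (n : Int) : String :=
  if n < 0 then ""  -- Python raises ValueError here; excluded by Pre_
  else
    let s := base91B_enc n.toNat
    String.mk (if s.length = 1 then '!' :: s else s)

-- ===== PRECONDITION & SPEC =====
-- Pre_ excludes exactly the negative inputs, on which A (and B) raise ValueError.
def Pre_base91_encode (n : Int) : Prop := 0 ≤ n
instance (n : Int) : Decidable (Pre_base91_encode n) := by unfold Pre_base91_encode; infer_instance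
def pvWitness_base91_encode : Int := (12345)

def Spec_base91_encode (n : Int) (out : String) : Prop := out = base91_encode_alt n
instance (n : Int) (out : String) : Decidable (Spec_base91_encode n out) := by unfold Spec_base91_encode; infer_instance

-- ===== CLAIM (what is proved, stated in full; the proofs are below) =====
def Claim_equal_base91_encode : Prop := ∀ (n : Int), Dom_base91_encode n → Pre_base91_encode n → Spec_base91_encode n (base91_encode n)

-- ===== LEMMAS AND PROOFS =====

-- A's loop only ever appends: factor out the accumulator.
theorem base91A_loop_append (m : Nat) : ∀ out : List Char,
    base91A_loop m out = out ++ base91A_loop m [] := by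
  induction m using Nat.strong_induction_on with
  | _ m ih =>
    intro out
    conv_lhs => rw [base91A_loop]
    conv_rhs => rw [base91A_loop]
    by_cases h : m / 91 = 0
    · simp [h]
    · have hlt : m / 91 < m := by omega
      simp only [h, dite_false]
      rw [ih _ hlt (out ++ [Char.ofNat (33 + m % 91)]),
          ih _ hlt ([] ++ [Char.ofNat (33 + m % 91)])]
      simp

-- A's reversed LSB-first digit list is B's MSB-first digit list.
theorem base91A_rev_eq_B (m : Nat) : (base91A_loop m []).reverse = base91B_enc m := by
  induction m using Nat.strong_induction_on with
  | _ m ih =>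
    conv_lhs => rw [base91A_loop]
    conv_rhs => rw [base91B_enc]
    by_cases h : m < 91
    · have h0 : m / 91 = 0 := Nat.div_eq_of_lt h
      have hm : m % 91 = m := Nat.mod_eq_of_lt h
      simp [h0, h, hm]
    · have h0 : ¬ m / 91 = 0 := by omega
      have hlt : m / 91 < m := by omega
      simp only [h0, dite_false, h]
      rw [base91A_loop_append]
      simp [ih _ hlt]

theorem base91_lengths (m : Nat) :
    (base91A_loop m []).length = (base91B_enc m).length := by
  rw [← base91A_rev_eq_B, List.length_reverse]

-- ===== VERDICT (by name: the statement is the Claim_ definition above) =====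
theorem base91_encode_spec : Claim_equal_base91_encode := by
  intro n _ hpre
  unfold Spec_base91_encode base91_encode base91_encode_alt
  have hn : ¬ n < 0 := not_lt.mpr hpre
  simp only [hn, if_false]
  by_cases hl : (base91A_loop n.toNat []).length = 1
  · have hl' : (base91B_enc n.toNat).length = 1 := by rw [← base91_lengths]; exact hl
    simp [hl, hl', base91A_rev_eq_B]
  · have hl' : ¬ (base91B_enc n.toNat).length = 1 := by rw [← base91_lengths]; exact hl
    simp [hl, hl', base91A_rev_eq_B]
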